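-- pv_equiv track=rewrite | github.com/zhmu/x86box | test/alu.py | my_rol
-- ===== SOURCE A (Python) =====
-- CF = (1 << 0)
--
-- OF = (1 << 11)
--
-- def set_flag(fl, on, flag):
--     if on:
--         fl = fl | flag
--     else:
--         fl = fl & ~flag
--     return fl
--
-- def my_rol(a, cnt, initial_flags):
--     cnt = cnt & 0x1f
--
--     new_fl = initial_flags
--     res = a
--     for _ in range(0, cnt % 8):
--         temp_cf = 1 if (res & 0x80) != 0 else 0
--         res = ((res << 1) + temp_cf) & 0xff
--
--     if cnt > 0:
--         new_fl = set_flag(new_fl, res & 1, CF)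
--         # OF is undefined if the count != 1, but it is set anyway
--         cf = 0x80 if (new_fl & CF) else 0
--         new_fl = set_flag(new_fl, (res & 0x80) ^ cf, OF)
--
--     return (res, new_fl)
-- ===== SOURCE B (Python) =====
-- CF = (1 << 0)
--
-- OF = (1 << 11)
--
-- def set_flag(fl, on, flag):
--     if on:
--         fl = fl | flag
--     else:
--         fl = fl & ~flag
--     return fl
--
-- def my_rol(a, cnt, initial_flags):
--     cnt = cnt & 0x1f
--     n = cnt % 8
--
--     if n == 0:
--         res = a
--     else:
--         av = a & 0xff
--         res = ((av << n) | (av >> (8 - n))) & 0xff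
--
--     new_fl = initial_flags
--     if cnt > 0:
--         new_fl = set_flag(new_fl, res & 1, CF)
--         cf = 0x80 if (new_fl & CF) else 0
--         new_fl = set_flag(new_fl, (res & 0x80) ^ cf, OF)
--
--     return (res, new_fl)
-- ===== Notes on version B (the rewrite author's own statement) =====
-- stated objective: simpler
-- what changed: Replaced the bit-by-bit rotation loop (up to 7 iterations of shift-and-carry) with a single closed-form 8-bit rotate expression ((av << n) | (av >> (8-n))) & 0xff, with n == 0 returning a unchanged; the flag logic is unchanged.
import Mathlib
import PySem

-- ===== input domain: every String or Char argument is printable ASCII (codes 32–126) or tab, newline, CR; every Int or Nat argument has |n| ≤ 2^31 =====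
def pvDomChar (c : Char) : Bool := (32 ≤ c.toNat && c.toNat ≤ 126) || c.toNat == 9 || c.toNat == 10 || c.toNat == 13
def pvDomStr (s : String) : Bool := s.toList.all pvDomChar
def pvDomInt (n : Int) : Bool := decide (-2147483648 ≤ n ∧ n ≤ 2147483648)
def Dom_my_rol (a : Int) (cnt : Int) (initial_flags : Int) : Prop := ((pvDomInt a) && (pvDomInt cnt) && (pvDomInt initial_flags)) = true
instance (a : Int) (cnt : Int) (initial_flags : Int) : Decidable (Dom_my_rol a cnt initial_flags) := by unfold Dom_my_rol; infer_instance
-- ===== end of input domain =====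

-- B replaces A's bit-by-bit rotation loop with a single closed-form 8-bit rotate expression (objective: simpler); flag logic unchanged.


-- ===== PORT A =====
-- set_flag(fl, on, flag); Python `if on:` on an int is `on ≠ 0`; `~flag` is Lean's Int `~~~` (same two's-complement value)
def set_flag (fl : Int) (on : Int) (flag : Int) : Int :=
  if on ≠ 0 then PySem.Int.bor fl flag else PySem.Int.band fl (~~~flag)

-- the body of A's `for` loop: one left-rotate-by-1 step on the low byte
def stepA (res : Int) : Int :=
  PySem.Int.band ((res <<< (1 : Nat)) + (if PySem.Int.band res 0x80 ≠ 0 then 1 else 0)) 0xff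

def my_rol (a : Int) (cnt : Int) (initial_flags : Int) : Int × Int :=
  let c := PySem.Int.band cnt 0x1f
  let res := (PySem.List.pyRange 0 (PySem.Int.mod c 8) 1).foldl (fun res _ => stepA res) a
  let new_fl :=
    if c > 0 then
      let f1 := set_flag initial_flags (PySem.Int.band res 1) 1
      let cf : Int := if PySem.Int.band f1 1 ≠ 0 then 0x80 else 0
      set_flag f1 (PySem.Int.bxor (PySem.Int.band res 0x80) cf) 2048
    else initial_flags
  (res, new_fl)

-- ===== PORT B =====
def my_rol_alt (a : Int) (cnt : Int) (initial_flags : Int) : Int × Int :=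
  let c := PySem.Int.band cnt 0x1f
  let n := PySem.Int.mod c 8
  let res :=
    if n = 0 then a
    else
      let av := PySem.Int.band a 0xff
      -- shifts by n and 8-n, both in [0,8), so the `.toNat` casts are exact
      PySem.Int.band (PySem.Int.bor (av <<< n.toNat) (av >>> (8 - n).toNat)) 0xff
  let new_fl :=
    if c > 0 then
      let f1 := set_flag initial_flags (PySem.Int.band res 1) 1
      let cf : Int := if PySem.Int.band f1 1 ≠ 0 then 0x80 else 0
      set_flag f1 (PySem.Int.bxor (PySem.Int.band res 0x80) cf) 2048
    else initial_flags
  (res, new_fl)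

-- ===== PRECONDITION & SPEC =====
def Spec_my_rol (a : Int) (cnt : Int) (initial_flags : Int) (out : Int × Int) : Prop := out = my_rol_alt a cnt initial_flags
instance (a : Int) (cnt : Int) (initial_flags : Int) (out : Int × Int) : Decidable (Spec_my_rol a cnt initial_flags out) := by unfold Spec_my_rol; infer_instance

-- ===== CLAIM (what is proved, stated in full; the proofs are below) =====
def Claim_equal_my_rol : Prop := ∀ (a : Int) (cnt : Int) (initial_flags : Int), Dom_my_rol a cnt initial_flags → Spec_my_rol a cnt initial_flags (my_rol a cnt initial_flags)

-- ===== LEMMAS AND PROOFS =====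

lemma band255_eq_emod (a : Int) : PySem.Int.band a 255 = a % 256 := by
  unfold PySem.Int.band
  split_ifs with h h2 h2 <;> try omega
  · have hx := Nat.and_two_pow_sub_one_eq_mod a.toNat 8
    norm_num at hx
    have h255 : Int.toNat 255 = 255 := rfl
    rw [h255, hx]
    omega
  · set m := (-a - 1).toNat with hm
    have hx := Nat.and_two_pow_sub_one_eq_mod m 8
    rw [Nat.and_comm] at hx
    norm_num at hx
    have h255 : Int.toNat 255 = 255 := rfl
    rw [h255, hx]
    omega

lemma band128_eq (a : Int) : PySem.Int.band a 128 = a % 256 - a % 128 := by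
  unfold PySem.Int.band
  split_ifs with h h2 h2 <;> try omega
  · have hx := Nat.and_two_pow a.toNat 7
    rw [Nat.testBit_eq_decide_div_mod_eq] at hx
    norm_num at hx
    have h128 : Int.toNat 128 = 128 := rfl
    rw [h128, hx]
    by_cases hd : a.toNat / 128 % 2 = 1 <;> simp [hd] <;> omega
  · set m := (-a - 1).toNat with hm
    have hx := Nat.and_two_pow m 7
    rw [Nat.testBit_eq_decide_div_mod_eq, Nat.and_comm] at hx
    norm_num at hx
    have h128 : Int.toNat 128 = 128 := rfl
    rw [h128, hx]
    by_cases hd : m / 128 % 2 = 1 <;> simp [hd] <;> omega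

lemma stepA_emod (a : Int) : stepA a = stepA (a % 256) := by
  unfold stepA
  simp only [band255_eq_emod, band128_eq, Int.shiftLeft_eq]
  norm_num
  split_ifs with hd <;> omega

-- the per-residue computation: for each shift count 0..7, iterating stepA on a byte equals the closed-form rotate
set_option maxRecDepth 100000 in
lemma rot_fin : ∀ j : Fin 8, ∀ x : Fin 256,
    (List.range j.val).foldl (fun r _ => stepA r) ((x : Nat) : Int) =
      (if (j : Nat) = 0 then ((x : Nat) : Int) else
        PySem.Int.band (PySem.Int.bor (((x : Nat) : Int) <<< (j : Nat)) (((x : Nat) : Int) >>> (8 - (j : Nat)))) 255) := by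
  decide

theorem my_rol_spec : Claim_equal_my_rol := by
  intro a cnt fl _
  unfold Spec_my_rol my_rol my_rol_alt
  have hc : 0 ≤ PySem.Int.band cnt 31 := by
    rw [PySem.Int.band_comm]; exact PySem.Int.band_nonneg_of_nonneg_left cnt (by norm_num)
  have hn0 : 0 ≤ PySem.Int.mod (PySem.Int.band cnt 31) 8 :=
    PySem.Int.mod_nonneg _ (by norm_num)
  have hn8 : PySem.Int.mod (PySem.Int.band cnt 31) 8 < 8 :=
    PySem.Int.mod_lt _ (by norm_num)
  -- the two `res` computations agree; the flag computation is then identical code on both sides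
  have hres : (PySem.List.pyRange 0 (PySem.Int.mod (PySem.Int.band cnt 31) 8) 1).foldl
        (fun res _ => stepA res) a =
      (if PySem.Int.mod (PySem.Int.band cnt 31) 8 = 0 then a
       else
         PySem.Int.band (PySem.Int.bor
           ((PySem.Int.band a 255) <<< (PySem.Int.mod (PySem.Int.band cnt 31) 8).toNat)
           ((PySem.Int.band a 255) >>> (8 - PySem.Int.mod (PySem.Int.band cnt 31) 8).toNat)) 255) := by
    generalize PySem.Int.mod (PySem.Int.band cnt 31) 8 = n at hn0 hn8 ⊢
    have hrange : PySem.List.pyRange 0 n 1 = List.map (fun (k : Nat) => (k : Int)) (List.range n.toNat) := by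
      conv_lhs => rw [← Int.toNat_of_nonneg hn0]
      exact PySem.List.pyRange_zero_natCast n.toNat
    rw [hrange, List.foldl_map]
    have key : ∀ b : Int, 0 ≤ b → b < 256 →
        (List.range n.toNat).foldl (fun r _ => stepA r) b =
          (if n = 0 then b else
            PySem.Int.band (PySem.Int.bor (b <<< n.toNat) (b >>> (8 - n).toNat)) 255) := by
      intro b hb0 hb256
      have hfin := rot_fin ⟨n.toNat, by omega⟩ ⟨b.toNat, by omega⟩
      rw [show ((b.toNat : Nat) : Int) = b from Int.toNat_of_nonneg hb0] at hfin
      rw [show 8 - n.toNat = (8 - n).toNat by omega] at hfin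
      rw [hfin]
      by_cases h0 : n = 0
      · simp [h0]
      · have hne : ¬ (n.toNat = 0) := by omega
        simp only [hne, if_false, h0, if_false]
    by_cases h0 : n = 0
    · simp [h0]
    · -- the first loop iteration already reduces the accumulator modulo 256
      obtain ⟨m, hm⟩ : ∃ m, n.toNat = m + 1 := ⟨n.toNat - 1, by omega⟩
      have hfold : (List.range n.toNat).foldl (fun r _ => stepA r) a =
          (List.range n.toNat).foldl (fun r _ => stepA r) (a % 256) := by
        rw [hm, List.range_succ_eq_map]
        simp only [List.foldl_cons]
        rw [stepA_emod]
      rw [hfold, key (a % 256) (by omega) (by omega)]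
      simp only [h0, if_false]
      rw [show PySem.Int.band a 255 = a % 256 from band255_eq_emod a]
  simp only [hres]
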